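-- pv_equiv track=rewrite | github.com/Jonathan523/gpg-fingerprint-filter-gpu | ca.py | count_consecutive_end_chars
-- ===== SOURCE A (Python) =====
-- def count_consecutive_end_chars(keyid):
--     """
--     计算 KeyID 末尾连续相同字符的数量。
--
--     :param keyid: KeyID 字符串
--     :return: 连续相同字符的数量（整数）
--     """
--     if not keyid:
--         return 0
--     last_char = keyid[-1]
--     count = 1
--     for char in reversed(keyid[:-1]):
--         if char == last_char:
--             count += 1
--         else:
--             break
--     return count
-- ===== SOURCE B (Python) =====
-- def count_consecutive_end_chars(keyid):
--     if not keyid: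
--         return 0
--     return len(keyid) - len(keyid.rstrip(keyid[-1]))
-- ===== Notes on version B (the rewrite author's own statement) =====
-- stated objective: idiomatic
-- what changed: Replaces the manual backward scan with an accumulator and early break by delegating removal of the trailing run to str.rstrip(last_char) and recovering the count as a length difference (strip-and-subtract, no loop or counter in user code).
import Mathlib
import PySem

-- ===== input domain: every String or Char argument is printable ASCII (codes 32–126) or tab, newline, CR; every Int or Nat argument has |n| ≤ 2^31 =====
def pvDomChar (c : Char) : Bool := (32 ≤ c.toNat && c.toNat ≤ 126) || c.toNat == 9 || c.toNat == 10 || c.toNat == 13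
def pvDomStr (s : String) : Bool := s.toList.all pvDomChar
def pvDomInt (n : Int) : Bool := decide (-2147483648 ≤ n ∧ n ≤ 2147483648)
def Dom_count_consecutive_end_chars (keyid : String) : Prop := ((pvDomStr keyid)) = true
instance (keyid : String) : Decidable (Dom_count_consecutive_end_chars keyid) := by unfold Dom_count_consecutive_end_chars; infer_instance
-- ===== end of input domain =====

-- B replaces A's manual backward scan with early break by str.rstrip(last char) plus a length
-- difference (strip-and-subtract), an idiomatic decomposition of the same O(n) task.


-- ===== PORT A =====
-- loop 'for char in reversed(keyid[:-1]): if char == last_char: count += 1 else: break'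
def ccecLoopA (last : Char) : List Char → Int → Int
  | [], count => count
  | ch :: rest, count => if ch == last then ccecLoopA last rest (count + 1) else count

def count_consecutive_end_chars (keyid : String) : Int :=
  if keyid.toList = [] then 0
  else
    match PySem.Str.pyGet? keyid (-1) with    -- keyid[-1]; some because keyid is nonempty
    | none => 0
    | some last_char =>
        ccecLoopA last_char ((PySem.Str.slice keyid none (some (-1))).toList.reverse) 1

-- ===== PORT B =====
-- s.rstrip(c) with a one-char strip set has no PySem primitive; it is ported by hand, exactly:
-- drop the maximal trailing block of chars equal to c (reverse / dropWhile (== c) / reverse).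
def ccecRstrip (s : List Char) (c : Char) : List Char :=
  ((s.reverse.dropWhile (fun ch => ch == c)).reverse)

def count_consecutive_end_chars_alt (keyid : String) : Int :=
  if keyid.toList = [] then 0
  else
    match PySem.Str.pyGet? keyid (-1) with    -- keyid[-1]
    | none => 0
    | some c =>
        (keyid.toList.length : Int) - ((ccecRstrip keyid.toList c).length : Int)

-- ===== PRECONDITION & SPEC =====
def Spec_count_consecutive_end_chars (keyid : String) (out : Int) : Prop := out = count_consecutive_end_chars_alt keyid
instance (keyid : String) (out : Int) : Decidable (Spec_count_consecutive_end_chars keyid out) := by unfold Spec_count_consecutive_end_chars; infer_instance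

-- ===== CLAIM (what is proved, stated in full; the proofs are below) =====
def Claim_equal_count_consecutive_end_chars : Prop := ∀ (keyid : String), Dom_count_consecutive_end_chars keyid → Spec_count_consecutive_end_chars keyid (count_consecutive_end_chars keyid)

-- ===== LEMMAS AND PROOFS =====

-- A's break-loop counts exactly the leading run of chars equal to `last`
theorem ccecLoopA_eq_takeWhile (last : Char) (l : List Char) (acc : Int) :
    ccecLoopA last l acc = acc + ((l.takeWhile (fun ch => ch == last)).length : Int) := by
  induction l generalizing acc with
  | nil => simp [ccecLoopA]
  | cons ch rest ih =>
      by_cases h : ch == last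
      · simp [ccecLoopA, h, List.takeWhile, ih]
        ring
      · simp [ccecLoopA, h, List.takeWhile]

-- ===== VERDICT (by name: the statement is the Claim_ definition above) =====
theorem count_consecutive_end_chars_spec : Claim_equal_count_consecutive_end_chars := by
  intro keyid _
  unfold Spec_count_consecutive_end_chars count_consecutive_end_chars count_consecutive_end_chars_alt ccecRstrip
  rcases hrev : keyid.toList.reverse with _ | ⟨h, t⟩
  · simp at hrev
    simp [hrev]
  · have hne : keyid.toList ≠ [] := by
      intro he; rw [he] at hrev; simp at hrev
    have hlast : keyid.toList.getLast? = some h := by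
      rw [← List.head?_reverse, hrev]; rfl
    have hdrop : keyid.toList.dropLast.reverse = t := by
      have : keyid.toList = (h :: t).reverse := by rw [← hrev]; simp
      rw [this]; simp
    have hlen : keyid.toList.length = t.length + 1 := by
      have := congrArg List.length hrev; simpa using this
    rw [if_neg hne, if_neg hne]
    rw [show PySem.Str.pyGet? keyid (-1) = keyid.toList.getLast? from by
          simp [PySem.Str.pyGet?, PySem.List.pyGet?_neg_one]]
    rw [hlast]
    rw [show (PySem.Str.slice keyid none (some (-1))).toList = keyid.toList.dropLast from
          PySem.Str.slice_to_neg_one keyid]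
    rw [hdrop]
    have hsplit : (t.takeWhile (fun ch => ch == h)).length
        + (t.dropWhile (fun ch => ch == h)).length = t.length := by
      have := congrArg List.length
        (List.takeWhile_append_dropWhile (p := fun ch => ch == h) (l := t))
      rw [List.length_append] at this
      omega
    simp [ccecLoopA_eq_takeWhile, hlen, List.dropWhile]
    omega
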